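-- pv_equiv track=rewrite | github.com/grycap/scar | scar.py | parse_aws_logs
-- ===== SOURCE A (Python) =====
-- def parse_aws_logs(logs, request_id):
--     if (logs is None) or (request_id is None):
--         return None
--     full_msg = ""
--     logging = False
--     lines = logs.split('\n')
--     for line in lines:
--         if line.startswith('REPORT') and request_id in line:
--             full_msg += line + '\n'
--             return full_msg
--         if logging:
--             full_msg += line + '\n'
--         if line.startswith('START') and request_id in line:
--             full_msg += line + '\n'
--             logging = True
-- ===== SOURCE B (Python) =====
-- def parse_aws_logs(logs, request_id):
--     if logs is None or request_id is None:
--         return None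
--     lines = logs.split('\n')
--     r = next((i for i, l in enumerate(lines)
--               if l.startswith('REPORT') and request_id in l), None)
--     if r is None:
--         return None
--     s = next((i for i, l in enumerate(lines[:r])
--               if l.startswith('START') and request_id in l), None)
--     start = r if s is None else s
--     return ''.join(l + '\n' for l in lines[start:r + 1])
-- ===== Notes on version B (the rewrite author's own statement) =====
-- stated objective: simpler
-- what changed: Replaces the single-pass boolean state machine with a locate-then-slice decomposition: find the index of the first matching REPORT line and of the first matching START line before it, then join that slice of lines.
-- intended difference: When a second matching START line occurs strictly between the first matching START and the first matching REPORT, A appends that line twice (its logging branch and its START branch both fire), while B includes every line of the window exactly once, which is the intended log excerpt. — e.g. on parse_aws_logs(some "START a\nSTART a\nREPORT a", some "a"): A returns some "START a\nSTART a\nSTART a\nREPORT a\n", B returns some "START a\nSTART a\nREPORT a\n"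
import Mathlib
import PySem

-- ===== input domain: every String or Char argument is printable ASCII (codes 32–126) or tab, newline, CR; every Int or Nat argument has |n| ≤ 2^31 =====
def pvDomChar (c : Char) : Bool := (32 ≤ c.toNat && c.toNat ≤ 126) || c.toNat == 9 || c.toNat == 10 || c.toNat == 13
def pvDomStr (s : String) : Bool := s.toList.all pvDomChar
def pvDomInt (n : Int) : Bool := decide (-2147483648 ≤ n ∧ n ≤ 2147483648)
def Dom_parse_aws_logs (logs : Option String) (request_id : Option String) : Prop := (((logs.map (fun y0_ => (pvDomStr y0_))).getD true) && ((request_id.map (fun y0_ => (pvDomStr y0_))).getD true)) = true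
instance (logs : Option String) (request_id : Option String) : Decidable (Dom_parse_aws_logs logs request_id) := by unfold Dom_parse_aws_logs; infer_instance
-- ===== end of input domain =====

-- B replaces A's one-pass boolean state machine by locate-the-boundaries-then-slice; on the corner where a
-- second matching START line lies inside the window, A duplicates that line and B keeps it once (see D_ below).

-- ===== PORT A =====
-- line.startswith('REPORT') and request_id in line
def pvIsRep (rid : List Char) (line : List Char) : Bool :=
  PySem.Chars.startswith line "REPORT".toList && PySem.Chars.isIn rid line

-- line.startswith('START') and request_id in line
def pvIsSta (rid : List Char) (line : List Char) : Bool :=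
  PySem.Chars.startswith line "START".toList && PySem.Chars.isIn rid line

-- the for-loop of A, state = (full_msg, logging); returning none = falling off the end (Python returns None)
def pvLoopA (rid : List Char) (lines : List (List Char)) (full_msg : List Char) (logging : Bool) : Option (List Char) :=
  match lines with
  | [] => none
  | line :: rest =>
    if pvIsRep rid line then some (full_msg ++ line ++ ['\n'])
    else
      let full_msg := if logging then full_msg ++ line ++ ['\n'] else full_msg
      if pvIsSta rid line then pvLoopA rid rest (full_msg ++ line ++ ['\n']) true
      else pvLoopA rid rest full_msg logging

def parse_aws_logs (logs : Option String) (request_id : Option String) : Option String :=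
  match logs, request_id with
  | some g, some rid =>
    (pvLoopA rid.toList (PySem.Chars.splitOn g.toList ['\n']) [] false).map String.ofList
  | _, _ => none

-- ===== PORT B =====
def parse_aws_logs_alt (logs : Option String) (request_id : Option String) : Option String :=
  match logs with
  | none => none
  | some g =>
   match request_id with
   | none => none
   | some rid =>
    let lines := PySem.Chars.splitOn g.toList ['\n']
    match lines.findIdx? (fun line => PySem.Chars.startswith line "REPORT".toList && PySem.Chars.isIn rid.toList line) with
    | none => none
    | some r =>
      let start := ((lines.take r).findIdx? (fun line => PySem.Chars.startswith line "START".toList && PySem.Chars.isIn rid.toList line)).getD r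
      some (String.ofList (PySem.Chars.join []
        ((PySem.List.slice lines (some (start : Int)) (some ((r + 1 : Nat) : Int))).map (· ++ ['\n']))))

-- ===== PRECONDITION & SPEC =====
-- When a second matching START line occurs strictly between the first matching START and the first matching
-- REPORT, A appends that line twice (its 'logging' branch and its START branch both fire) while B includes each
-- line of the window once, which is the intended log excerpt.
-- a log line opening with `tag` and mentioning the request id
def pvMark (tag : String) (rid line : List Char) : Bool := tag.toList.isPrefixOf line && decide (rid <:+: line)

def D_parse_aws_logs (logs : Option String) (request_id : Option String) : Prop :=
  ((logs.bind fun g => request_id.map fun rid =>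
     let lines := PySem.Chars.splitOn g.toList ['\n']
     let before := lines.takeWhile (fun l => !pvMark "REPORT" rid.toList l)
     decide (before ≠ lines ∧ 2 ≤ before.countP (pvMark "START" rid.toList))).getD false) = true

instance (logs : Option String) (request_id : Option String) : Decidable (D_parse_aws_logs logs request_id) := by
  unfold D_parse_aws_logs; infer_instance

def Spec_parse_aws_logs (logs : Option String) (request_id : Option String) (out : Option String) : Prop :=
  ¬ D_parse_aws_logs logs request_id → out = parse_aws_logs_alt logs request_id

instance (logs : Option String) (request_id : Option String) (out : Option String) : Decidable (Spec_parse_aws_logs logs request_id out) := by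
  unfold Spec_parse_aws_logs; infer_instance

def pvDiffWitness_parse_aws_logs : Option String × Option String :=
  (some "START a\nSTART a\nREPORT a", some "a")

def pvDiffWitnessOut_parse_aws_logs : (Option String) × (Option String) :=
  (some "START a\nSTART a\nSTART a\nREPORT a\n", some "START a\nSTART a\nREPORT a\n")

-- ===== CLAIM (what is proved, stated in full; the proofs are below) =====
def Claim_unchanged_parse_aws_logs : Prop := ∀ (logs : Option String) (request_id : Option String), Dom_parse_aws_logs logs request_id → Spec_parse_aws_logs logs request_id (parse_aws_logs logs request_id)
def Claim_changed_parse_aws_logs : Prop := Dom_parse_aws_logs (pvDiffWitness_parse_aws_logs.1) (pvDiffWitness_parse_aws_logs.2) ∧ D_parse_aws_logs (pvDiffWitness_parse_aws_logs.1) (pvDiffWitness_parse_aws_logs.2) ∧ parse_aws_logs (pvDiffWitness_parse_aws_logs.1) (pvDiffWitness_parse_aws_logs.2) = pvDiffWitnessOut_parse_aws_logs.1 ∧ parse_aws_logs_alt (pvDiffWitness_parse_aws_logs.1) (pvDiffWitness_parse_aws_logs.2) = pvDiffWitnessOut_parse_aws_logs.2 ∧ pvDiffWitnessOut_parse_aws_logs.1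 ≠ pvDiffWitnessOut_parse_aws_logs.2

def Claim_exact_parse_aws_logs : Prop := ∀ (logs : Option String) (request_id : Option String), Dom_parse_aws_logs logs request_id → D_parse_aws_logs logs request_id → parse_aws_logs logs request_id ≠ parse_aws_logs_alt logs request_id

-- ===== LEMMAS AND PROOFS =====

-- ''.join with empty separator distributes over append
theorem pv_join_empty_append (xs ys : List (List Char)) :
    PySem.Chars.join [] (xs ++ ys) = PySem.Chars.join [] xs ++ PySem.Chars.join [] ys := by
  induction xs with
  | nil => simp [PySem.Chars.join_nil]
  | cons a t ih =>
    cases t with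
    | nil =>
      cases ys with
      | nil => simp [PySem.Chars.join_singleton, PySem.Chars.join_nil]
      | cons b u => simp [PySem.Chars.join_singleton, PySem.Chars.join_cons_cons]
    | cons c u =>
      simp only [List.cons_append, PySem.Chars.join_cons_cons] at *
      simp [ih]


-- no matching REPORT line anywhere: A falls off the loop (Python returns None), whatever the state
theorem pvLoopA_none (rid : List Char) (ls : List (List Char))
    (h : ∀ l ∈ ls, pvIsRep rid l = false) (acc : List Char) (b : Bool) :
    pvLoopA rid ls acc b = none := by
  induction ls generalizing acc b with
  | nil => rfl
  | cons l t ih =>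
    have hl := h l (by simp)
    have ht : ∀ x ∈ t, pvIsRep rid x = false := fun x hx => h x (by simp [hx])
    simp only [pvLoopA, hl, if_false, Bool.false_eq_true]
    split <;> exact ih ht _ _


-- lines matching neither predicate are skipped while logging is off
theorem pvLoopA_skip (rid : List Char) (pre rest : List (List Char)) (acc : List Char)
    (h : ∀ l ∈ pre, pvIsRep rid l = false ∧ pvIsSta rid l = false) :
    pvLoopA rid (pre ++ rest) acc false = pvLoopA rid rest acc false := by
  induction pre with
  | nil => rfl
  | cons l t ih =>
    have hl := h l (by simp)
    have ht : ∀ x ∈ t, pvIsRep rid x = false ∧ pvIsSta rid x = false := fun x hx => h x (by simp [hx])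
    simp only [List.cons_append, pvLoopA, hl.1, hl.2, Bool.false_eq_true, if_false]
    exact ih ht


-- logging phase over plain lines up to the REPORT line
theorem pvLoopA_log (rid : List Char) (pre : List (List Char)) (rep : List Char)
    (rest : List (List Char)) (acc : List Char)
    (h : ∀ l ∈ pre, pvIsRep rid l = false ∧ pvIsSta rid l = false)
    (hrep : pvIsRep rid rep = true) :
    pvLoopA rid (pre ++ rep :: rest) acc true
      = some (acc ++ PySem.Chars.join [] (pre.map (· ++ ['\n'])) ++ rep ++ ['\n']) := by
  induction pre generalizing acc with
  | nil => simp [pvLoopA, hrep, PySem.Chars.join_nil]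
  | cons l t ih =>
    have hl := h l (by simp)
    have ht : ∀ x ∈ t, pvIsRep rid x = false ∧ pvIsSta rid x = false := fun x hx => h x (by simp [hx])
    have hj : PySem.Chars.join [] ((l :: t).map (· ++ ['\n']))
        = (l ++ ['\n']) ++ PySem.Chars.join [] (t.map (· ++ ['\n'])) := by
      have := pv_join_empty_append [l ++ ['\n']] (t.map (· ++ ['\n']))
      simpa [PySem.Chars.join_singleton] using this
    simp only [List.cons_append, pvLoopA, hl.1, hl.2, Bool.false_eq_true, if_false, if_true]
    rw [ih _ ht, hj]
    simp [List.append_assoc]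

-- first-hit characterisation: takeWhile(not p) is exactly the prefix before the first index found by findIdx?
theorem pv_takeWhile_eq_take {α : Type} (p : α → Bool) (l : List α) (r : Nat)
    (h : l.findIdx? p = some r) : l.takeWhile (fun a => !p a) = l.take r := by
  induction l generalizing r with
  | nil => simp at h
  | cons a t ih =>
    rw [List.findIdx?_cons] at h
    by_cases hp : p a
    · simp only [hp, if_true] at h
      obtain rfl : (0 : Nat) = r := Option.some.inj h
      simp [hp]
    · simp only [hp, if_false, Bool.false_eq_true, Option.map_eq_some_iff] at h
      obtain ⟨r', hr', rfl⟩ := h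
      simp [hp, ih r' hr']

-- the inline predicates of port B are pvIsRep / pvIsSta
theorem pv_repFun (rid : List Char) :
    (fun line => PySem.Chars.startswith line "REPORT".toList && PySem.Chars.isIn rid line) = pvIsRep rid := rfl
theorem pv_staFun (rid : List Char) :
    (fun line => PySem.Chars.startswith line "START".toList && PySem.Chars.isIn rid line) = pvIsSta rid := rfl

-- D_'s prefix/infix predicates agree with pvIsRep / pvIsSta
theorem pv_isIn_eq_decide (sub s : List Char) : decide (sub <:+: s) = PySem.Chars.isIn sub s := by
  rcases h : PySem.Chars.isIn sub s with _ | _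
  · simp [(PySem.Chars.isIn_eq_false_iff sub s).mp h]
  · simp [(PySem.Chars.isIn_iff_infix sub s).mp h]

theorem pv_startswith_eq (p s : List Char) : p.isPrefixOf s = PySem.Chars.startswith s p := by
  rcases h : PySem.Chars.startswith s p with _ | _
  · simp only [Bool.eq_false_iff] at h ⊢
    exact fun hc => h ((PySem.Chars.startswith_iff s p).mpr (List.isPrefixOf_iff_prefix.mp hc))
  · simp [List.isPrefixOf_iff_prefix, (PySem.Chars.startswith_iff s p).mp h]

theorem pv_D_repFun (rid : List Char) :
    (fun l => !pvMark "REPORT" rid l) = (fun l => !pvIsRep rid l) := by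
  funext l
  simp [pvMark, pv_isIn_eq_decide, pv_startswith_eq, pvIsRep]
theorem pv_D_staFun (rid : List Char) :
    pvMark "START" rid = pvIsSta rid := by
  funext l
  simp [pvMark, pv_isIn_eq_decide, pv_startswith_eq, pvIsSta]

-- the heart of the equivalence, at the level of the split line list
theorem pv_main (rid : List Char) (lines : List (List Char))
    (hD : ∀ r, lines.findIdx? (pvIsRep rid) = some r → (lines.take r).countP (pvIsSta rid) ≤ 1) :
    pvLoopA rid lines [] false =
      match lines.findIdx? (pvIsRep rid) with
      | none => none
      | some r =>
        some (PySem.Chars.join []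
          ((PySem.List.slice lines (some ((((lines.take r).findIdx? (pvIsSta rid)).getD r : Nat) : Int))
              (some ((r + 1 : Nat) : Int))).map (· ++ ['\n']))) := by
  cases hr : lines.findIdx? (pvIsRep rid) with
  | none =>
    exact pvLoopA_none rid lines (fun l hl => by simpa using (List.findIdx?_eq_none_iff.mp hr l hl)) [] false
  | some r =>
    obtain ⟨hrlen, hPrep, hPbefore⟩ := List.findIdx?_eq_some_iff_getElem.mp hr
    have htakelen : (lines.take r).length = r := by simp [List.length_take]; omega
    have hPre_noP : ∀ x ∈ lines.take r, pvIsRep rid x = false := by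
      intro x hx
      obtain ⟨j, hj, hjx⟩ := List.mem_iff_getElem.mp hx
      have hjr : j < r := by omega
      rw [List.getElem_take] at hjx
      subst hjx
      simpa using hPbefore j hjr
    have e1 : lines.take r ++ lines[r] :: lines.drop (r + 1) = lines := by
      rw [List.getElem_cons_drop, List.take_append_drop]
    cases hs : (lines.take r).findIdx? (pvIsSta rid) with
    | none =>
      have hPre_noS := List.findIdx?_eq_none_iff.mp hs
      have hA : pvLoopA rid lines [] false = some ([] ++ lines[r] ++ ['\n']) := by
        conv_lhs => rw [← e1]
        rw [pvLoopA_skip rid _ _ _ (fun l hl => ⟨hPre_noP l hl, by simpa using hPre_noS l hl⟩)]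
        simp [pvLoopA, hPrep]
      rw [hA]
      simp only [hs, Option.getD_none]
      rw [PySem.List.slice_natCast]
      have hn : r + 1 - r = 0 + 1 := by omega
      rw [hn, ← List.getElem_cons_drop hrlen, List.take_succ_cons, List.take_zero]
      simp only [List.map_cons, List.map_nil, PySem.Chars.join_singleton, List.nil_append]
    | some s =>
      obtain ⟨hslt, hSst, hSbefore⟩ := List.findIdx?_eq_some_iff_getElem.mp hs
      have hsr : s < r := by omega
      have hcount := hD r hr
      set st := (lines.take r)[s] with hst
      set p1 := (lines.take r).take s with hp1
      set p2 := (lines.take r).drop (s + 1) with hp2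
      have e2 : p1 ++ st :: p2 = lines.take r := by
        rw [hp1, hp2, hst, List.getElem_cons_drop, List.take_append_drop]
      have hp1len : p1.length = s := by simp [hp1, List.length_take]; omega
      have hp2len : p2.length = r - (s + 1) := by simp [hp2, htakelen]
      have hp2_noS : ∀ x ∈ p2, pvIsSta rid x = false := by
        intro x hx
        by_contra hSx
        rw [← e2] at hcount
        have hpos : 0 < p2.countP (pvIsSta rid) :=
          List.countP_pos_iff.mpr ⟨x, hx, by simpa using hSx⟩
        simp [List.countP_append, hSst] at hcount
        omega
      have hp1prop : ∀ l ∈ p1, pvIsRep rid l = false ∧ pvIsSta rid l = false := by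
        intro l hl
        refine ⟨hPre_noP l (List.mem_of_mem_take hl), ?_⟩
        obtain ⟨j, hj, hjx⟩ := List.mem_iff_getElem.mp hl
        have hjs : j < s := by omega
        rw [List.getElem_take] at hjx
        subst hjx
        simpa using hSbefore j hjs
      have hp2prop : ∀ l ∈ p2, pvIsRep rid l = false ∧ pvIsSta rid l = false :=
        fun l hl => ⟨hPre_noP l (List.mem_of_mem_drop hl), hp2_noS l hl⟩
      have hPst : pvIsRep rid st = false := hPre_noP st (by rw [← e2]; simp)
      have hA : pvLoopA rid lines [] false
          = some (([] ++ st ++ ['\n']) ++ PySem.Chars.join [] (p2.map (· ++ ['\n'])) ++ lines[r] ++ ['\n']) := by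
        conv_lhs => rw [← e1, ← e2]
        rw [List.append_assoc, List.cons_append,
          pvLoopA_skip rid p1 _ _ hp1prop]
        simp only [pvLoopA, hPst, Bool.false_eq_true, if_false, hSst, if_true]
        exact pvLoopA_log rid p2 lines[r] _ _ hp2prop hPrep
      rw [hA]
      simp only [hs, Option.getD_some]
      rw [PySem.List.slice_natCast]
      have hdrop : lines.drop s = st :: (p2 ++ lines[r] :: lines.drop (r + 1)) := by
        conv_lhs => rw [← e1, ← e2]
        rw [List.append_assoc, List.cons_append, List.drop_left' hp1len]
      have htake : (st :: (p2 ++ lines[r] :: lines.drop (r + 1))).take (r + 1 - s)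
          = st :: (p2 ++ [lines[r]]) := by
        have hn : r + 1 - s = (r - s - 1 + 1) + 1 := by omega
        rw [hn, List.take_succ_cons]
        congr 1
        have : p2 ++ lines[r] :: lines.drop (r + 1) = (p2 ++ [lines[r]]) ++ lines.drop (r + 1) := by simp
        rw [this, List.take_left' (by simp [hp2len]; omega)]
      rw [hdrop, htake]
      have hmap : (p2 ++ [lines[r]]).map (· ++ ['\n'])
          = p2.map (· ++ ['\n']) ++ [lines[r] ++ ['\n']] := by simp
      have hj : PySem.Chars.join [] ((st :: (p2 ++ [lines[r]])).map (· ++ ['\n']))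
          = (st ++ ['\n']) ++ (PySem.Chars.join [] (p2.map (· ++ ['\n'])) ++ (lines[r] ++ ['\n'])) := by
        rw [List.map_cons, hmap]
        have h1 := pv_join_empty_append [st ++ ['\n']] (p2.map (· ++ ['\n']) ++ [lines[r] ++ ['\n']])
        have h2 := pv_join_empty_append (p2.map (· ++ ['\n'])) [lines[r] ++ ['\n']]
        simp only [List.singleton_append] at h1
        rw [h1, h2]
        simp [PySem.Chars.join_singleton]
      rw [hj]
      simp [List.append_assoc]

-- ===== VERDICT (by name: the statement is the Claim_ definition above) =====
theorem parse_aws_logs_spec : Claim_unchanged_parse_aws_logs := by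
  intro logs request_id _ hD
  match logs, request_id with
  | none, none => rfl
  | none, some _ => rfl
  | some _, none => rfl
  | some g, some rid =>
    have hD' : ∀ r, (PySem.Chars.splitOn g.toList ['\n']).findIdx? (pvIsRep rid.toList) = some r →
        ((PySem.Chars.splitOn g.toList ['\n']).take r).countP (pvIsSta rid.toList) ≤ 1 := by
      intro r hrr
      by_contra hcnt
      apply hD
      have hlen : r < (PySem.Chars.splitOn g.toList ['\n']).length :=
        (List.findIdx?_eq_some_iff_getElem.mp hrr).1
      have htw := pv_takeWhile_eq_take (pvIsRep rid.toList) (PySem.Chars.splitOn g.toList ['\n']) r hrr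
      unfold D_parse_aws_logs
      simp only [Option.bind_some, Option.map_some, Option.getD_some, pv_D_repFun, pv_D_staFun,
        htw, decide_eq_true_eq]
      refine ⟨fun he => ?_, by omega⟩
      have := congrArg List.length he
      simp [List.length_take] at this
      omega
    simp only [parse_aws_logs, parse_aws_logs_alt, pv_repFun, pv_staFun,
      pv_main rid.toList _ hD']
    cases h : (PySem.Chars.splitOn g.toList ['\n']).findIdx? (pvIsRep rid.toList) <;> simp

theorem parse_aws_logs_changed : Claim_changed_parse_aws_logs := by
  unfold Claim_changed_parse_aws_logs; decide

-- ''.join with empty separator over a cons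
theorem pv_join_empty_cons (x : List Char) (xs : List (List Char)) :
    PySem.Chars.join [] (x :: xs) = x ++ PySem.Chars.join [] xs := by
  simpa [PySem.Chars.join_singleton] using pv_join_empty_append [x] xs

-- what A actually accumulates in logging mode: every further matching START line appears twice
def pvDup (rid : List Char) : List (List Char) → List Char
  | [] => []
  | l :: t => (if pvIsSta rid l then l ++ ['\n'] ++ l ++ ['\n'] else l ++ ['\n']) ++ pvDup rid t

theorem pvLoopA_log_gen (rid : List Char) (pre : List (List Char)) (rep : List Char)
    (rest : List (List Char)) (acc : List Char)
    (h : ∀ l ∈ pre, pvIsRep rid l = false) (hrep : pvIsRep rid rep = true) :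
    pvLoopA rid (pre ++ rep :: rest) acc true = some (acc ++ pvDup rid pre ++ rep ++ ['\n']) := by
  induction pre generalizing acc with
  | nil => simp [pvLoopA, hrep, pvDup]
  | cons l t ih =>
    have hl := h l (by simp)
    have ht : ∀ x ∈ t, pvIsRep rid x = false := fun x hx => h x (by simp [hx])
    by_cases hS : pvIsSta rid l = true
    · simp only [List.cons_append, pvLoopA, hl, Bool.false_eq_true, if_false, hS, if_true]
      rw [ih _ ht]
      simp [pvDup, hS, List.append_assoc]
    · simp only [List.cons_append, pvLoopA, hl, Bool.false_eq_true, if_false, hS]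
      rw [ih _ ht]
      simp only [pvDup]
      rw [if_neg hS]
      simp [List.append_assoc]

theorem pvDup_le (rid : List Char) (l : List (List Char)) :
    (PySem.Chars.join [] (l.map (· ++ ['\n']))).length ≤ (pvDup rid l).length := by
  induction l with
  | nil => simp [pvDup, PySem.Chars.join_nil]
  | cons a t ih =>
    rw [List.map_cons, pv_join_empty_cons]
    simp only [pvDup, List.length_append]
    split_ifs <;> simp_all
    omega

theorem pvDup_lt (rid : List Char) (l : List (List Char))
    (hx : ∃ x ∈ l, pvIsSta rid x = true) :
    (PySem.Chars.join [] (l.map (· ++ ['\n']))).length < (pvDup rid l).length := by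
  induction l with
  | nil => simp at hx
  | cons a t ih =>
    rw [List.map_cons, pv_join_empty_cons]
    by_cases hS : pvIsSta rid a = true
    · have := pvDup_le rid t
      simp only [pvDup, List.length_append]
      rw [if_pos hS]
      simp only [List.length_append, List.length_cons, List.length_nil]
      omega
    · obtain ⟨x, hxm, hxS⟩ := hx
      have hxt : x ∈ t := by
        rcases List.mem_cons.mp hxm with rfl | h
        · exact absurd hxS hS
        · exact h
      have := ih ⟨x, hxt, hxS⟩
      simp only [pvDup, List.length_append]
      rw [if_neg hS]
      simp only [List.length_append, List.length_cons, List.length_nil]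
      omega

-- everything failing a predicate: takeWhile of the negation keeps the whole list
theorem pv_takeWhile_all {α : Type} (p : α → Bool) (l : List α)
    (h : l.findIdx? p = none) : l.takeWhile (fun a => !p a) = l :=
  List.takeWhile_eq_self_iff.mpr fun x hx => by
    simp [List.findIdx?_eq_none_iff.mp h x hx]

theorem parse_aws_logs_tight : Claim_exact_parse_aws_logs := by
  intro logs request_id _ hD
  match logs, request_id with
  | none, _ => exact absurd hD (by simp [D_parse_aws_logs])
  | some _, none => exact absurd hD (by simp [D_parse_aws_logs])
  | some g, some rid =>
    simp only [D_parse_aws_logs, Option.bind_some, Option.map_some, Option.getD_some,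
      pv_D_repFun, pv_D_staFun, decide_eq_true_eq] at hD
    obtain ⟨hne, hcnt⟩ := hD
    rcases hr : (PySem.Chars.splitOn g.toList ['\n']).findIdx? (pvIsRep rid.toList) with _ | r
    · exact absurd (pv_takeWhile_all _ _ hr) hne
    set lines := PySem.Chars.splitOn g.toList ['\n'] with hlines
    have htw := pv_takeWhile_eq_take (pvIsRep rid.toList) lines r hr
    rw [htw] at hne hcnt
    obtain ⟨hrlen, hPrep, hPbefore⟩ := List.findIdx?_eq_some_iff_getElem.mp hr
    have htakelen : (lines.take r).length = r := by simp [List.length_take]; omega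
    have hPre_noP : ∀ x ∈ lines.take r, pvIsRep rid.toList x = false := by
      intro x hx
      obtain ⟨j, hj, hjx⟩ := List.mem_iff_getElem.mp hx
      have hjr : j < r := by omega
      rw [List.getElem_take] at hjx
      subst hjx
      simpa using hPbefore j hjr
    have e1 : lines.take r ++ lines[r] :: lines.drop (r + 1) = lines := by
      rw [List.getElem_cons_drop, List.take_append_drop]
    rcases hs : (lines.take r).findIdx? (pvIsSta rid.toList) with _ | s
    · have hz : (lines.take r).countP (pvIsSta rid.toList) = 0 :=
        List.countP_eq_zero.mpr fun x hx => by
          simp [List.findIdx?_eq_none_iff.mp hs x hx]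
      omega
    obtain ⟨hslt, hSst, hSbefore⟩ := List.findIdx?_eq_some_iff_getElem.mp hs
    have hsr : s < r := by omega
    set st := (lines.take r)[s] with hst
    set p1 := (lines.take r).take s with hp1
    set p2 := (lines.take r).drop (s + 1) with hp2
    have e2 : p1 ++ st :: p2 = lines.take r := by
      rw [hp1, hp2, hst, List.getElem_cons_drop, List.take_append_drop]
    have hp1len : p1.length = s := by simp [hp1, List.length_take]; omega
    have hp2len : p2.length = r - (s + 1) := by simp [hp2, htakelen]
    have hp1prop : ∀ l ∈ p1, pvIsRep rid.toList l = false ∧ pvIsSta rid.toList l = false := by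
      intro l hl
      refine ⟨hPre_noP l (List.mem_of_mem_take hl), ?_⟩
      obtain ⟨j, hj, hjx⟩ := List.mem_iff_getElem.mp hl
      have hjs : j < s := by omega
      rw [List.getElem_take] at hjx
      subst hjx
      simpa using hSbefore j hjs
    have hp2noP : ∀ l ∈ p2, pvIsRep rid.toList l = false :=
      fun l hl => hPre_noP l (List.mem_of_mem_drop hl)
    have hPst : pvIsRep rid.toList st = false := hPre_noP st (by rw [← e2]; simp)
    have hp2S : ∃ x ∈ p2, pvIsSta rid.toList x = true := by
      have hz : p1.countP (pvIsSta rid.toList) = 0 :=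
        List.countP_eq_zero.mpr fun x hx => by simp [(hp1prop x hx).2]
      rw [← e2, List.countP_append, List.countP_cons, hz, hSst, if_pos rfl] at hcnt
      exact List.countP_pos_iff.mp (by omega)
    have hA : parse_aws_logs (some g) (some rid)
        = some (String.ofList (st ++ ['\n'] ++ (pvDup rid.toList p2 ++ (lines[r] ++ ['\n'])))) := by
      simp only [parse_aws_logs, ← hlines]
      conv_lhs => rw [← e1, ← e2]
      rw [List.append_assoc, List.cons_append, pvLoopA_skip rid.toList p1 _ _ hp1prop]
      simp only [pvLoopA, hPst, Bool.false_eq_true, if_false, hSst, if_true]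
      rw [pvLoopA_log_gen rid.toList p2 lines[r] _ _ hp2noP hPrep]
      simp [List.append_assoc]
    have hB : parse_aws_logs_alt (some g) (some rid)
        = some (String.ofList (st ++ ['\n'] ++ (PySem.Chars.join [] (p2.map (· ++ ['\n'])) ++ (lines[r] ++ ['\n'])))) := by
      simp only [parse_aws_logs_alt, pv_repFun, pv_staFun, ← hlines, hr, hs, Option.getD_some]
      rw [PySem.List.slice_natCast]
      have hdrop : lines.drop s = st :: (p2 ++ lines[r] :: lines.drop (r + 1)) := by
        conv_lhs => rw [← e1, ← e2]
        rw [List.append_assoc, List.cons_append, List.drop_left' hp1len]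
      have htake : (st :: (p2 ++ lines[r] :: lines.drop (r + 1))).take (r + 1 - s)
          = st :: (p2 ++ [lines[r]]) := by
        have hn : r + 1 - s = (r - s - 1 + 1) + 1 := by omega
        rw [hn, List.take_succ_cons]
        congr 1
        have : p2 ++ lines[r] :: lines.drop (r + 1) = (p2 ++ [lines[r]]) ++ lines.drop (r + 1) := by simp
        rw [this, List.take_left' (by simp [hp2len]; omega)]
      rw [hdrop, htake]
      have hmap : (p2 ++ [lines[r]]).map (· ++ ['\n'])
          = p2.map (· ++ ['\n']) ++ [lines[r] ++ ['\n']] := by simp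
      rw [List.map_cons, hmap, pv_join_empty_cons, pv_join_empty_append,
        PySem.Chars.join_singleton]
    rw [hA, hB]
    intro heq
    have hlists := congrArg (fun o => (Option.map String.toList o).getD []) heq
    simp only [Option.map_some, Option.getD_some, String.toList_ofList] at hlists
    have hlen := congrArg List.length hlists
    have hlt := pvDup_lt rid.toList p2 hp2S
    simp only [List.length_append] at hlen
    omega
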